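-- pv_equiv track=rewrite | github.com/brandonwise/mcp-trust-radar | src/mcp_trust_radar/scoring.py | normalize_prompt_injection_controls
-- ===== SOURCE A (Python) =====
-- from typing import List, Optional, Tuple
--
-- PROMPT_INJECTION_CONTROLS = {
--     "allowlist_only_tools",
--     "tool_description_sanitization",
--     "server_instruction_sanitization",
--     "tool_argument_validation",
--     "resource_content_sanitization",
--     "human_approval_for_writes",
-- }
--
-- def normalize_prompt_injection_controls(controls: Optional[List[str]]) -> Tuple[List[str], List[str]]:
--     if not controls:
--         return [], []
--
--     normalized: List[str] = []
--     unknown: List[str] = []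
--     seen = set()
--
--     for control in controls:
--         key = control.strip().lower()
--         if not key or key in seen:
--             continue
--         seen.add(key)
--         if key in PROMPT_INJECTION_CONTROLS:
--             normalized.append(key)
--         else:
--             unknown.append(control)
--
--     return normalized, unknown
-- ===== SOURCE B (Python) =====
-- from typing import List, Optional, Tuple
--
-- PROMPT_INJECTION_CONTROLS = {
--     "allowlist_only_tools",
--     "tool_description_sanitization",
--     "server_instruction_sanitization",
--     "tool_argument_validation",
--     "resource_content_sanitization",
--     "human_approval_for_writes",
-- }
--
-- def normalize_prompt_injection_controls(controls: Optional[List[str]]) -> Tuple[List[str], List[str]]: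
--     if not controls:
--         return [], []
--     # Pass 1: insertion-ordered index, key -> first original control string
--     index = {}
--     for control in controls:
--         key = control.strip().lower()
--         if key and key not in index:
--             index[key] = control
--     # Pass 2/3: classify from the index
--     normalized = [k for k in index if k in PROMPT_INJECTION_CONTROLS]
--     unknown = [orig for k, orig in index.items() if k not in PROMPT_INJECTION_CONTROLS]
--     return normalized, unknown
-- ===== Notes on version B (the rewrite author's own statement) =====
-- stated objective: alternative
-- what changed: Replaces A's single interleaved classify-while-deduping loop (two output lists plus a seen-set) with a build-then-filter decomposition: one pass builds an insertion-ordered dict from stripped-lowered key to first original string, then two filter passes over the dict derive the known and unknown lists.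
import Mathlib
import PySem

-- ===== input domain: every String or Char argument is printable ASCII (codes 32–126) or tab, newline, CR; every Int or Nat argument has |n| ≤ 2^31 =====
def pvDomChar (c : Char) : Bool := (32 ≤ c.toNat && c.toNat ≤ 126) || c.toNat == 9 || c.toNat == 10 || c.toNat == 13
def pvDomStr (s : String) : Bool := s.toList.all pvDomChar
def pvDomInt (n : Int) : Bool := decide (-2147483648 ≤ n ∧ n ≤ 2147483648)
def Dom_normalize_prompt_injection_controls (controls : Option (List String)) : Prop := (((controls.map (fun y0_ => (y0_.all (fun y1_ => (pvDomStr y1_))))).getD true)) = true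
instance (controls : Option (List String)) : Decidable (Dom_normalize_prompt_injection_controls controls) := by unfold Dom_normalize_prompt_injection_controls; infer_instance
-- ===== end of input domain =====

-- B is an alternative decomposition: build an insertion-ordered key->first-original dict, then filter it twice (same cost as A).
-- ===== PORT A =====
def picSet : PySem.Set String := PySem.Set.ofList
  ["allowlist_only_tools", "tool_description_sanitization", "server_instruction_sanitization",
   "tool_argument_validation", "resource_content_sanitization", "human_approval_for_writes"]

def pvStepA (st : List String × List String × PySem.Set String) (control : String) :
    List String × List String × PySem.Set String :=
  let key := PySem.Str.lower (PySem.Str.strip control)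
  if key == "" || PySem.Set.contains st.2.2 key then st
  else
    let seen := PySem.Set.add st.2.2 key
    if PySem.Set.contains picSet key then (st.1 ++ [key], st.2.1, seen)
    else (st.1, st.2.1 ++ [control], seen)

def normalize_prompt_injection_controls (controls : Option (List String)) : List String × List String :=
  match controls with
  | none => ([], [])
  | some cs =>
    if cs.isEmpty then ([], [])
    else
      let st := cs.foldl pvStepA ([], [], PySem.Set.empty)
      (st.1, st.2.1)

-- ===== PORT B =====
def pvStepB (d : PySem.Dict String String) (control : String) : PySem.Dict String String :=
  let key := PySem.Str.lower (PySem.Str.strip control)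
  if key != "" && !(d.contains key) then d.insert key control else d

def normalize_prompt_injection_controls_alt (controls : Option (List String)) : List String × List String :=
  match controls with
  | none => ([], [])
  | some cs =>
    if cs.isEmpty then ([], [])
    else
      let d := cs.foldl pvStepB PySem.Dict.empty
      (d.keys.filter (fun k => PySem.Set.contains picSet k),
       (d.items.filter (fun p => !(PySem.Set.contains picSet p.1))).map (·.2))

-- ===== PRECONDITION & SPEC =====
def Spec_normalize_prompt_injection_controls (controls : Option (List String)) (out : List String × List String) : Prop := out = normalize_prompt_injection_controls_alt controls
instance (controls : Option (List String)) (out : List String × List String) : Decidable (Spec_normalize_prompt_injection_controls controls out) := by unfold Spec_normalize_prompt_injection_controls; infer_instance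

-- ===== CLAIM (what is proved, stated in full; the proofs are below) =====
def Claim_equal_normalize_prompt_injection_controls : Prop := ∀ (controls : Option (List String)), Dom_normalize_prompt_injection_controls controls → Spec_normalize_prompt_injection_controls controls (normalize_prompt_injection_controls controls)

-- ===== LEMMAS AND PROOFS =====

-- Loop invariant: A's fold state is determined by B's dict at every step.
lemma loop_eq (cs : List String) : ∀ (d : PySem.Dict String String), d.keys.Nodup →
    cs.foldl pvStepA
      (d.keys.filter (fun k => PySem.Set.contains picSet k),
       (d.items.filter (fun p => !(PySem.Set.contains picSet p.1))).map (·.2),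
       d.keys)
    = ((cs.foldl pvStepB d).keys.filter (fun k => PySem.Set.contains picSet k),
       ((cs.foldl pvStepB d).items.filter (fun p => !(PySem.Set.contains picSet p.1))).map (·.2),
       (cs.foldl pvStepB d).keys) := by
  induction cs with
  | nil => intro d hnd; rfl
  | cons c cs ih =>
    intro d hnd
    simp only [List.foldl_cons, pvStepA, pvStepB]
    generalize PySem.Str.lower (PySem.Str.strip c) = k
    by_cases hk : k = ""
    · subst hk
      rw [if_pos (show (("" : String) == "" || PySem.Set.contains d.keys "") = true by simp),
          if_neg (show ¬((("" : String) != "" && !d.contains "") = true) by simp)]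
      exact ih d hnd
    · by_cases hc : d.contains k = true
      · have hmem : k ∈ d.keys := (PySem.Dict.contains_iff_mem_keys d k).mp hc
        have hset : PySem.Set.contains d.keys k = true := by simp [PySem.Set.contains, hmem]
        rw [if_pos (show (k == "" || PySem.Set.contains d.keys k) = true by simp [hmem]),
            if_neg (show ¬((k != "" && !d.contains k) = true) by simp [hc])]
        exact ih d hnd
      · have hc' : d.contains k = false := by simpa using hc
        have hnm : k ∉ d.keys := fun hm => by
          simp [(PySem.Dict.contains_iff_mem_keys d k).mpr hm] at hc'
        have hset : PySem.Set.contains d.keys k = false := by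
          simp [PySem.Set.contains, hnm]
        have hkeys : (d.insert k c).keys = d.keys ++ [k] :=
          PySem.Dict.keys_insert_of_not_contains d c hc'
        have hitems : (d.insert k c).items = d.items ++ [(k, c)] :=
          PySem.Dict.items_insert_of_not_contains d c hc'
        have hadd : PySem.Set.add d.keys k = d.keys ++ [k] := by
          simp [PySem.Set.add, hnm]
        have hnd' : (d.insert k c).keys.Nodup := by
          rw [hkeys]
          exact List.Nodup.append hnd (List.nodup_singleton k)
            (fun x hx hy => by simp at hy; exact hnm (hy ▸ hx))
        rw [if_neg (show ¬((k == "" || PySem.Set.contains d.keys k) = true) by simp [hk, hnm]),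
            if_pos (show (k != "" && !d.contains k) = true by simp [hk, hc'])]
        have hrec := ih (d.insert k c) hnd'
        rw [hkeys, hitems] at hrec
        by_cases hp : k ∈ picSet
        · rw [if_pos (show PySem.Set.contains picSet k = true by simp [PySem.Set.contains, hp]), hadd]
          simpa [List.filter_append, hp] using hrec
        · rw [if_neg (show ¬(PySem.Set.contains picSet k = true) by simp [PySem.Set.contains, hp]), hadd]
          simpa [List.filter_append, hp] using hrec

-- ===== VERDICT (by name: the statement is the Claim_ definition above) =====
theorem normalize_prompt_injection_controls_spec : Claim_equal_normalize_prompt_injection_controls := by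
  intro controls _
  unfold Spec_normalize_prompt_injection_controls
  match controls with
  | none => rfl
  | some cs =>
    by_cases he : cs.isEmpty
    · simp [normalize_prompt_injection_controls, normalize_prompt_injection_controls_alt, he]
    · have h := loop_eq cs PySem.Dict.empty List.nodup_nil
      rw [show (PySem.Dict.empty : PySem.Dict String String).keys = [] from rfl,
          show (PySem.Dict.empty : PySem.Dict String String).items = [] from rfl] at h
      simp only [List.filter_nil, List.map_nil] at h
      simp only [normalize_prompt_injection_controls, normalize_prompt_injection_controls_alt]
      rw [if_neg he, if_neg he]
      rw [show (PySem.Set.empty : PySem.Set String) = ([] : List String) from rfl, h]
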